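-- pv_equiv track=rewrite | github.com/mustafasencer/AlgorithmDataStructureWithGraphviz | problems/string/smallest_string_with_a_given_value.py | solve
-- ===== SOURCE A (Python) =====
-- def solve(n, k):
-- 	result = ["a"] * n
-- 	remaining = k - n
--
-- 	idx = n - 1
-- 	while remaining > 0:
-- 		if remaining > 25:
-- 			result[idx] = "z"
-- 			remaining -= 25
-- 		else:
-- 			result[idx] = chr(96 + remaining + 1)
-- 			remaining = 0
-- 		idx -= 1
-- 	return "".join(result)
-- ===== SOURCE B (Python) =====
-- def solve(n, k):
--     remaining = k - n
--     if remaining <= 0: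
--         return "a" * n
--     z_count = (remaining - 1) // 25
--     t = remaining - 25 * z_count  # in 1..25
--     return "a" * (n - z_count - 1) + chr(97 + t) + "z" * z_count
-- ===== Notes on version B (the rewrite author's own statement) =====
-- stated objective: simpler
-- what changed: Replaces the fill-from-the-end while loop that mutates a list with a closed-form computation: the number of trailing 'z's and the one transition character are obtained directly by division, and the string is built in one expression.
-- outside the precondition, e.g. on solve(2, 100): A returns 'xz', B returns 'xzzz'; on solve(0, 5): A raises IndexError, B returns 'f'
import Mathlib
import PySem

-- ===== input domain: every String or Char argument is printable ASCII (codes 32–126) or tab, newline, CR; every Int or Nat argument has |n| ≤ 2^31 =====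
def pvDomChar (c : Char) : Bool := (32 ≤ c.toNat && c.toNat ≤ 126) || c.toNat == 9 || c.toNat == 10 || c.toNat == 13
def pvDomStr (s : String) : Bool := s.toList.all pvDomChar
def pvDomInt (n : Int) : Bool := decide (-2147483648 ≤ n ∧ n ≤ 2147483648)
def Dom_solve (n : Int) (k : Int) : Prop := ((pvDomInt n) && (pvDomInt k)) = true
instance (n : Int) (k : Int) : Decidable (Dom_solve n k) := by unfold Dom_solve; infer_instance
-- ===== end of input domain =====

-- B replaces A's fill-from-the-end mutating loop with a closed-form construction (objective: simpler).

-- ===== PORT A =====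
-- the while loop of A: each element of `result` is a single-character string, modelled as Char;
-- list assignment result[idx] = c is PySem.List.pySetD (exact under Pre_, which keeps idx in range)
def solveLoopA (result : List Char) (remaining : Int) (idx : Int) : List Char :=
  if h : remaining > 0 then
    if remaining > 25 then
      solveLoopA (PySem.List.pySetD result idx 'z') (remaining - 25) (idx - 1)
    else
      solveLoopA (PySem.List.pySetD result idx (Char.ofNat (96 + remaining + 1).toNat)) 0 (idx - 1)
  else result
termination_by remaining.toNat
decreasing_by all_goals omega

def solve (n : Int) (k : Int) : String :=
  String.ofList (solveLoopA (List.replicate n.toNat 'a') (k - n) (n - 1))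

-- ===== PORT B =====
def solve_alt (n : Int) (k : Int) : String :=
  let remaining := k - n
  if remaining ≤ 0 then String.ofList (List.replicate n.toNat 'a')
  else
    let z_count := PySem.Int.floordiv (remaining - 1) 25
    let t := remaining - 25 * z_count
    String.ofList (List.replicate (n - z_count - 1).toNat 'a'
               ++ [Char.ofNat (97 + t).toNat]
               ++ List.replicate z_count.toNat 'z')

-- ===== PRECONDITION & SPEC =====
-- Pre_ excludes the infeasible inputs with k > n and k > 26*n (no length-n string has value sum k):
-- there A either raises IndexError or, via Python's negative-index wraparound, overwrites the list
-- from the end a second time and returns an accidental short string.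
def Pre_solve (n : Int) (k : Int) : Prop := k ≤ n ∨ k ≤ 26 * n
instance (n : Int) (k : Int) : Decidable (Pre_solve n k) := by unfold Pre_solve; infer_instance
def pvWitness_solve : Int × Int := (3, 30)

def Spec_solve (n : Int) (k : Int) (out : String) : Prop := out = solve_alt n k
instance (n : Int) (k : Int) (out : String) : Decidable (Spec_solve n k out) := by unfold Spec_solve; infer_instance

-- ===== CLAIM (what is proved, stated in full; the proofs are below) =====
def Claim_equal_solve : Prop := ∀ (n : Int) (k : Int), Dom_solve n k → Pre_solve n k → Spec_solve n k (solve n k)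

-- ===== LEMMAS AND PROOFS =====

-- setting position m-1 of (replicate m 'a' ++ suf)
theorem pySetD_replicate_append (m : Nat) (hm : 1 ≤ m) (suf : List Char) (c : Char) :
    PySem.List.pySetD (List.replicate m 'a' ++ suf) ((m : Int) - 1) c
      = List.replicate (m - 1) 'a' ++ c :: suf := by
  rw [PySem.List.pySetD_of_nonneg _ _ (by omega)]
  have hm1 : ((m : Int) - 1).toNat = m - 1 := by omega
  have hrep : List.replicate m 'a' = List.replicate (m - 1) 'a' ++ ['a'] := by
    conv_lhs => rw [show m = (m - 1) + 1 by omega]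
    rw [List.replicate_succ']
  rw [hm1, hrep, List.append_assoc, List.set_append]
  simp

-- loop characterisation: with z = (r-1)//25 writes fit inside the replicate prefix
theorem solveLoopA_closed (r : Int) (m : Nat) (suf : List Char)
    (hr : 0 < r) (hz : PySem.Int.floordiv (r - 1) 25 + 1 ≤ (m : Int)) :
    solveLoopA (List.replicate m 'a' ++ suf) r ((m : Int) - 1)
      = List.replicate (m - (PySem.Int.floordiv (r - 1) 25).toNat - 1) 'a'
        ++ Char.ofNat (97 + (r - 25 * PySem.Int.floordiv (r - 1) 25)).toNat
           :: (List.replicate (PySem.Int.floordiv (r - 1) 25).toNat 'z' ++ suf) := by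
  have hfd : PySem.Int.floordiv (r - 1) 25 = (r - 1) / 25 :=
    PySem.Int.floordiv_eq_ediv_of_pos (by omega)
  rw [solveLoopA]
  rw [dif_pos hr]
  by_cases h25 : r > 25
  · rw [if_pos h25]
    have hz1 : (1:Int) ≤ (r - 1) / 25 := by omega
    have hm1 : 2 ≤ (m : Int) := by omega
    rw [pySetD_replicate_append m (by omega) suf 'z']
    have hidx : (m : Int) - 1 - 1 = ((m - 1 : Nat) : Int) - 1 := by omega
    rw [hidx]
    have ih := solveLoopA_closed (r - 25) (m - 1) ('z' :: suf) (by omega) (by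
      rw [PySem.Int.floordiv_eq_ediv_of_pos (by omega)]; omega)
    rw [ih]
    have hfd' : PySem.Int.floordiv (r - 25 - 1) 25 = (r - 1) / 25 - 1 := by
      rw [PySem.Int.floordiv_eq_ediv_of_pos (by omega)]; omega
    rw [hfd', hfd]
    have e1 : (m - 1) - ((r - 1) / 25 - 1).toNat - 1 = m - ((r - 1) / 25).toNat - 1 := by omega
    have e2 : r - 25 - 25 * ((r - 1) / 25 - 1) = r - 25 * ((r - 1) / 25) := by ring
    have e3 : List.replicate ((r - 1) / 25 - 1).toNat 'z' ++ 'z' :: suf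
        = List.replicate ((r - 1) / 25).toNat 'z' ++ suf := by
      have hnat : ((r - 1) / 25).toNat = ((r - 1) / 25 - 1).toNat + 1 := by omega
      rw [hnat, List.replicate_succ']; simp
    rw [e1, e2, e3]
  · rw [if_neg h25]
    have hz0 : (r - 1) / 25 = 0 := by omega
    rw [pySetD_replicate_append m (by omega) suf _]
    rw [solveLoopA]
    rw [dif_neg (by omega)]
    rw [hfd, hz0]
    norm_num
    congr 1
    omega
termination_by r.toNat
decreasing_by omega

-- ===== VERDICT (by name: the statement is the Claim_ definition above) =====
theorem solve_spec : Claim_equal_solve := by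
  intro n k hdom hpre
  unfold Spec_solve solve solve_alt
  by_cases hr : k - n ≤ 0
  · rw [if_pos hr, solveLoopA, dif_neg (by omega)]
  · rw [if_neg hr]
    have hk26 : k ≤ 26 * n := by unfold Pre_solve at hpre; omega
    have hn1 : 1 ≤ n := by omega
    have hfd : PySem.Int.floordiv (k - n - 1) 25 = (k - n - 1) / 25 :=
      PySem.Int.floordiv_eq_ediv_of_pos (by omega)
    have hzb : PySem.Int.floordiv (k - n - 1) 25 + 1 ≤ ((n.toNat : Nat) : Int) := by
      rw [hfd]; omega
    have hc := solveLoopA_closed (k - n) n.toNat [] (by omega) hzb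
    rw [List.append_nil] at hc
    rw [show n - 1 = ((n.toNat : Int)) - 1 by omega, hc]
    congr 1
    rw [hfd]
    rw [show (n - (k - n - 1) / 25 - 1).toNat = n.toNat - ((k - n - 1) / 25).toNat - 1 by omega]
    simp
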